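-- pv_equiv track=rewrite | github.com/Andrew-Foote/aoc | solutions/python/y2022/d9.py | diagram
-- ===== SOURCE A (Python) =====
-- Point = tuple[int, int]
--
-- def diagram(hpos: Point, tpos: Point) -> str:
-- 	ymin = min(hpos[0], tpos[0], 0)
-- 	ymax = max(hpos[0], tpos[0], 0)
-- 	xmin = min(hpos[1], tpos[1], 0)
-- 	xmax = max(hpos[1], tpos[1], 0)
--
-- 	lines = []
--
-- 	for i in range(ymin, ymax + 1):
-- 		chars = []
--
-- 		for j in range(xmin, xmax + 1):
-- 			if (i, j) == hpos:
-- 				chars.append('H')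
-- 			elif (i, j) == tpos:
-- 				chars.append('T')
-- 			else:
-- 				chars.append('.')
--
-- 		lines.append(''.join(chars))
--
-- 	return '\n'.join(lines)
-- ===== SOURCE B (Python) =====
-- def diagram(hpos, tpos):
--     ymin = min(hpos[0], tpos[0], 0)
--     ymax = max(hpos[0], tpos[0], 0)
--     xmin = min(hpos[1], tpos[1], 0)
--     xmax = max(hpos[1], tpos[1], 0)
--     w = xmax - xmin + 1
--
--     def cell(k):
--         q, r = divmod(k, w + 1)
--         if r == w:
--             return '\n'
--         p = (ymin + q, xmin + r)
--         if p == hpos: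
--             return 'H'
--         if p == tpos:
--             return 'T'
--         return '.'
--
--     n = (ymax - ymin + 1) * (w + 1) - 1
--     return ''.join(cell(k) for k in range(n))
-- ===== Notes on version B (the rewrite author's own statement) =====
-- stated objective: alternative
-- what changed: Replaces A's nested row/column loops (per-row char lists joined per row, then rows joined by newline) with a single flat pass over linear character addresses 0..h*(w+1)-2, each address decoded by divmod into a (row,col) cell or a newline slot, so rows and both joins disappear.
import Mathlib
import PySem

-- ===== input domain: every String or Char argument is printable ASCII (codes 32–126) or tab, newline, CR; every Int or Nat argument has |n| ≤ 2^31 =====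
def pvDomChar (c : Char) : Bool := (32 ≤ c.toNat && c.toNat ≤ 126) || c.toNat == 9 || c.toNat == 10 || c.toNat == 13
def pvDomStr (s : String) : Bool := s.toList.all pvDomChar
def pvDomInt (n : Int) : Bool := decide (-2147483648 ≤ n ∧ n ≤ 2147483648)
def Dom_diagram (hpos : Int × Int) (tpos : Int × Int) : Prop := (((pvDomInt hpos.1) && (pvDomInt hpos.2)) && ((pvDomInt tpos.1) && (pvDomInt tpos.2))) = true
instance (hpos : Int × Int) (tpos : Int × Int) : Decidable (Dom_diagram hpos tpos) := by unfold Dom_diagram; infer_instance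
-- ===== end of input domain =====

-- B replaces A's nested row/column loops by a single flat pass over linear character
-- addresses 0..h*(w+1)-2: each index is decoded by divmod into (row, col) or a newline
-- slot, so rows, per-row joins and the '\n'-join disappear. Objective: alternative.

-- ===== PORT A =====
def diagram (hpos : Int × Int) (tpos : Int × Int) : String :=
  let ymin := min (min hpos.1 tpos.1) 0
  let ymax := max (max hpos.1 tpos.1) 0
  let xmin := min (min hpos.2 tpos.2) 0
  let xmax := max (max hpos.2 tpos.2) 0
  let lines := (PySem.List.pyRange ymin (ymax + 1) 1).foldl (fun lines i =>
      let chars := (PySem.List.pyRange xmin (xmax + 1) 1).foldl (fun chars j =>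
          chars ++ [if (i, j) = hpos then "H" else if (i, j) = tpos then "T" else "."])
        ([] : List String)
      lines ++ [PySem.Str.join "" chars]) ([] : List String)
  PySem.Str.join "\n" lines

-- ===== PORT B =====
def diagram_alt (hpos : Int × Int) (tpos : Int × Int) : String :=
  let ymin := min (min hpos.1 tpos.1) 0
  let ymax := max (max hpos.1 tpos.1) 0
  let xmin := min (min hpos.2 tpos.2) 0
  let xmax := max (max hpos.2 tpos.2) 0
  let w := xmax - xmin + 1
  let cell := fun (k : Int) =>
    let q := PySem.Int.floordiv k (w + 1)
    let r := PySem.Int.mod k (w + 1)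
    if r = w then "\n"
    else if (ymin + q, xmin + r) = hpos then "H"
    else if (ymin + q, xmin + r) = tpos then "T"
    else "."
  let n := (ymax - ymin + 1) * (w + 1) - 1
  PySem.Str.join "" ((PySem.List.pyRange 0 n 1).map cell)

-- ===== PRECONDITION & SPEC =====
def Spec_diagram (hpos : Int × Int) (tpos : Int × Int) (out : String) : Prop := out = diagram_alt hpos tpos
instance (hpos : Int × Int) (tpos : Int × Int) (out : String) : Decidable (Spec_diagram hpos tpos out) := by unfold Spec_diagram; infer_instance

-- ===== CLAIM (what is proved, stated in full; the proofs are below) =====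
def Claim_equal_diagram : Prop := ∀ (hpos : Int × Int) (tpos : Int × Int), Dom_diagram hpos tpos → Spec_diagram hpos tpos (diagram hpos tpos)

-- ===== LEMMAS AND PROOFS =====

-- a foldl that only appends singletons is a map
theorem foldl_append_map {α β : Type} (f : α → β) (l : List α) (init : List β) :
    l.foldl (fun acc x => acc ++ [f x]) init = init ++ l.map f := by
  induction l generalizing init with
  | nil => simp
  | cons x xs ih => simp [List.foldl, ih]

-- join with empty separator is concatenation
theorem join_nil_eq_flatten (l : List (List Char)) :
    PySem.Chars.join [] l = l.flatten := by
  induction l with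
  | nil => simp [PySem.Chars.join_nil]
  | cons x xs ih =>
    cases xs with
    | nil => simp [PySem.Chars.join_singleton]
    | cons y ys => rw [PySem.Chars.join_cons_cons, ih]; simp

-- join distributes over appending one more part (to a nonempty list)
theorem join_cons_append_singleton (sep x : List Char) :
    ∀ (ys : List (List Char)) (y : List Char),
    PySem.Chars.join sep ((y :: ys) ++ [x]) = PySem.Chars.join sep (y :: ys) ++ sep ++ x := by
  intro ys
  induction ys with
  | nil =>
    intro y
    rw [List.cons_append, List.nil_append, PySem.Chars.join_cons_cons,
        PySem.Chars.join_singleton, PySem.Chars.join_singleton]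
  | cons z zs ih =>
    intro y
    rw [List.cons_append, List.cons_append, PySem.Chars.join_cons_cons,
        PySem.Chars.join_cons_cons, ← List.cons_append, ih z]
    simp

-- CORE: a flat scan over linear addresses, decoded by div/mod, equals the
-- row-by-row picture with '\n' separators.
theorem flat_core (g : ℕ → ℕ → List Char) (w : ℕ) (hw : 0 < w) :
    ∀ h : ℕ, 0 < h →
    PySem.Chars.join [] ((List.range (h * (w + 1) - 1)).map
        (fun k => if k % (w + 1) = w then ['\n'] else g (k / (w + 1)) (k % (w + 1))))
    = PySem.Chars.join ['\n'] ((List.range h).map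
        (fun q => PySem.Chars.join [] ((List.range w).map (g q)))) := by
  intro h hh
  obtain ⟨h', rfl⟩ : ∃ h', h = h' + 1 := ⟨h - 1, by omega⟩
  clear hh
  induction h' with
  | zero =>
    rw [show 1 * (w + 1) - 1 = w by omega, List.range_one, List.map_cons, List.map_nil,
        PySem.Chars.join_singleton]
    refine congrArg _ (List.map_congr_left ?_)
    intro k hk
    rw [List.mem_range] at hk
    rw [Nat.mod_eq_of_lt (by omega), Nat.div_eq_of_lt (by omega), if_neg (by omega)]
  | succ m ih =>
    have hmul1 : (m + 1) * (w + 1) = m * (w + 1) + (w + 1) := by ring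
    have hmul2 : (m + 1 + 1) * (w + 1) = (m + 1) * (w + 1) + (w + 1) := by ring
    have hsplit : (m + 1 + 1) * (w + 1) - 1 = ((m + 1) * (w + 1) - 1) + (w + 1) := by omega
    rw [hsplit, List.range_add, List.map_append, join_nil_eq_flatten, List.flatten_append,
        ← join_nil_eq_flatten]
    -- decode the extra block of w+1 addresses
    have hblock : (List.range (w + 1)).map
        (fun t => if ((m + 1) * (w + 1) - 1 + t) % (w + 1) = w then ['\n']
          else g (((m + 1) * (w + 1) - 1 + t) / (w + 1)) (((m + 1) * (w + 1) - 1 + t) % (w + 1)))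
        = ['\n'] :: (List.range w).map (g (m + 1)) := by
      rw [List.range_succ_eq_map, List.map_cons, List.map_map]
      have ha : (m + 1) * (w + 1) - 1 + 0 = m * (w + 1) + w := by omega
      have h0 : ((m + 1) * (w + 1) - 1 + 0) % (w + 1) = w := by
        rw [ha, Nat.mul_comm m (w + 1), Nat.mul_add_mod, Nat.mod_eq_of_lt (by omega)]
      rw [if_pos h0]
      refine congrArg _ (List.map_congr_left ?_)
      intro t ht
      rw [List.mem_range] at ht
      have hat : (m + 1) * (w + 1) - 1 + Nat.succ t = (w + 1) * (m + 1) + t := by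
        have e1 := hmul1
        have e2 : (w + 1) * (m + 1) = m * (w + 1) + (w + 1) := by ring
        omega
      simp only [Function.comp]
      rw [hat, Nat.mul_add_mod, Nat.mod_eq_of_lt (by omega), if_neg (by omega),
          Nat.mul_add_div (by omega), Nat.div_eq_of_lt (by omega)]
    simp only [List.map_map, Function.comp_def]
    rw [hblock]
    -- right-hand side: peel off the last row
    rw [List.range_succ, List.map_append, List.map_cons, List.map_nil]
    cases hrows : (List.range (m + 1)).map
        (fun q => PySem.Chars.join [] ((List.range w).map (g q))) with
    | nil =>
      exfalso
      have : ((List.range (m + 1)).map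
          (fun q => PySem.Chars.join [] ((List.range w).map (g q)))).length = m + 1 := by
        simp
      rw [hrows] at this; simp at this
    | cons r0 rest =>
      rw [join_cons_append_singleton, ← hrows, ← ih]
      simp [join_nil_eq_flatten]
-- BRIDGE: the row-by-row joined picture over integer bounds equals the flat
-- divmod-decoded scan B performs (stated for an arbitrary per-cell function gc).
theorem grid_flat (gc : Int → Int → List Char) (ymin ymax xmin xmax : Int)
    (hy0 : ymin ≤ 0) (hy1 : 0 ≤ ymax) (hx0 : xmin ≤ 0) (hx1 : 0 ≤ xmax) :
    PySem.Chars.join ['\n'] ((PySem.List.pyRange ymin (ymax + 1) 1).map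
        (fun i => PySem.Chars.join [] ((PySem.List.pyRange xmin (xmax + 1) 1).map (gc i))))
    = PySem.Chars.join [] ((PySem.List.pyRange 0
          ((ymax - ymin + 1) * ((xmax - xmin + 1) + 1) - 1) 1).map
        (fun k =>
          if PySem.Int.mod k ((xmax - xmin + 1) + 1) = (xmax - xmin + 1) then ['\n']
          else gc (ymin + PySem.Int.floordiv k ((xmax - xmin + 1) + 1))
                  (xmin + PySem.Int.mod k ((xmax - xmin + 1) + 1)))) := by
  obtain ⟨H, hHc, hHpos⟩ : ∃ n : ℕ, (ymax - ymin + 1 : ℤ) = ↑n ∧ 0 < n :=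
    ⟨(ymax - ymin + 1).toNat, by omega, by omega⟩
  obtain ⟨W, hWc, hWpos⟩ : ∃ n : ℕ, (xmax - xmin + 1 : ℤ) = ↑n ∧ 0 < n :=
    ⟨(xmax - xmin + 1).toNat, by omega, by omega⟩
  have hY : (ymax + 1 - ymin).toNat = H := by omega
  have hX : (xmax + 1 - xmin).toNat = W := by omega
  have h1 : 1 ≤ H * (W + 1) := Nat.mul_pos hHpos (by omega)
  have hN : (ymax - ymin + 1) * ((xmax - xmin + 1) + 1) - 1 = ((H * (W + 1) - 1 : ℕ) : ℤ) := by
    rw [hHc, hWc, Nat.cast_sub h1]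
    push_cast
    ring
  have hW1 : (xmax - xmin + 1) + 1 = ((W + 1 : ℕ) : ℤ) := by omega
  rw [hN, PySem.List.pyRange_zero_natCast, List.map_map,
      PySem.List.pyRange_one ymin (ymax + 1), PySem.List.pyRange_one xmin (xmax + 1), hY, hX,
      List.map_map]
  have hcell : ((fun k : ℤ =>
        if PySem.Int.mod k ((xmax - xmin + 1) + 1) = (xmax - xmin + 1) then ['\n']
        else gc (ymin + PySem.Int.floordiv k ((xmax - xmin + 1) + 1))
                (xmin + PySem.Int.mod k ((xmax - xmin + 1) + 1))) ∘ (fun k : ℕ => (↑k : ℤ)))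
      = (fun m : ℕ => if m % (W + 1) = W then ['\n']
          else (fun q r : ℕ => gc (ymin + ↑q) (xmin + ↑r)) (m / (W + 1)) (m % (W + 1))) := by
    funext m
    simp only [Function.comp_apply]
    rw [hW1, hWc, PySem.Int.mod_natCast, PySem.Int.floordiv_natCast]
    by_cases hc : m % (W + 1) = W
    · rw [if_pos (by exact_mod_cast hc), if_pos hc]
    · rw [if_neg (by exact_mod_cast hc), if_neg hc]
  rw [hcell, flat_core (fun q r : ℕ => gc (ymin + ↑q) (xmin + ↑r)) W hWpos H hHpos]
  simp only [List.map_map, Function.comp_def]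

-- ===== VERDICT (by name: the statement is the Claim_ definition above) =====
theorem diagram_spec : Claim_equal_diagram := by
  intro hpos tpos _
  show diagram hpos tpos = diagram_alt hpos tpos
  unfold diagram diagram_alt
  dsimp only
  apply String.ext
  rw [PySem.Str.toList_join, PySem.Str.toList_join]
  simp only [foldl_append_map, List.nil_append, List.map_map, Function.comp_def,
    PySem.Str.toList_join]
  simp only [apply_ite String.toList]
  have eH : "H".toList = ['H'] := rfl
  have eT : "T".toList = ['T'] := rfl
  have eD : ".".toList = ['.'] := rfl
  have eN : "\n".toList = ['\n'] := rfl
  have eE : "".toList = [] := rfl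
  rw [eH, eT, eD, eN, eE]
  exact grid_flat
    (fun i j => if (i, j) = hpos then ['H'] else if (i, j) = tpos then ['T'] else ['.'])
    (min (min hpos.1 tpos.1) 0) (max (max hpos.1 tpos.1) 0)
    (min (min hpos.2 tpos.2) 0) (max (max hpos.2 tpos.2) 0)
    (by omega) (by omega) (by omega) (by omega)
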